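-- pv_equiv track=rewrite | github.com/SnoopKilla/Intelligent-Athlete | Python/Model Training/XGB_binary.py | corrector
-- ===== SOURCE A (Python) =====
-- def future_check(labels, i, n):
--     result = True
--     for j in range(n):
--         try:
--             to_check = labels[i + j + 1]
--         except:
--             break
--         if labels[i] != to_check:
--             result = False
--     return result
--
-- def corrector(labels, n):
--     current = labels[0]
--     for i in range(len(labels)):
--         if labels[i] != current:
--             if future_check(labels, i, n):
--                 current = labels[i]
--             else:
--                 labels[i] = current
--     return labels
-- ===== SOURCE B (Python) =====
-- def corrector(labels, n):
--     # Precompute suffix constant-run lengths once (O(len)), then a single pass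
--     # replaces each future_check scan with one run-length comparison.
--     if not labels:
--         return labels
--     m = len(labels)
--     run = [1] * m
--     for i in range(m - 2, -1, -1):
--         if labels[i] == labels[i + 1]:
--             run[i] = run[i + 1] + 1
--     current = labels[0]
--     for i in range(m):
--         if labels[i] != current and run[i] >= min(n + 1, m - i):
--             current = labels[i]
--         else:
--             labels[i] = current
--     return labels
-- ===== Notes on version B (the rewrite author's own statement) =====
-- stated objective: faster
-- what changed: Precomputes the length of the constant run starting at each suffix position once, then a single left-to-right pass replaces every future_check scan of up to n elements with one run-length comparison.
-- crash fix: On an empty labels list A raises IndexError (labels[0]); B returns the empty list. — e.g. on corrector([], 0): A raises IndexError, B returns []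
import Mathlib
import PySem

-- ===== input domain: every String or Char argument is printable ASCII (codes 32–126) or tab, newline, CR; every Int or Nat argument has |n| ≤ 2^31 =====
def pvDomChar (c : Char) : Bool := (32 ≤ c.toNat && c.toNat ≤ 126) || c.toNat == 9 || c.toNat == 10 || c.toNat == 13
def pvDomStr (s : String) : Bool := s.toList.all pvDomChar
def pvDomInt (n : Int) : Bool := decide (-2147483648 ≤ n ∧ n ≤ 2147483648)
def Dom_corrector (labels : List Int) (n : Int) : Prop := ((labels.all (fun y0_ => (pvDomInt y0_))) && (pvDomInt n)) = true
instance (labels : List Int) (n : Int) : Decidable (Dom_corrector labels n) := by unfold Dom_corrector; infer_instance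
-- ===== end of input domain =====

-- B replaces each future_check scan with one comparison against suffix run lengths
-- precomputed in a single backward pass (objective: faster).
-- Both Pythons mutate `labels` in place the same way; the theorems are about the return value.

-- ===== PORT A =====
-- 'for j in range(n)' with a break: fuel = number of remaining iterations, j the loop counter
def fc_go (labels : List Int) (i : Int) (j : Nat) (fuel : Nat) (result : Bool) : Bool :=
  match fuel with
  | 0 => result
  | f + 1 =>
    match PySem.List.pyGet? labels (i + (j : Int) + 1) with
    | none => result                       -- except: break
    | some to_check =>
      fc_go labels i (j + 1) f (if PySem.List.pyGet? labels i ≠ some to_check then false else result)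

def future_check (labels : List Int) (i n : Int) : Bool :=
  fc_go labels i 0 n.toNat true

def correctorStep (n : Int) (st : List Int × Int) (i : Nat) : List Int × Int :=
  match PySem.List.pyGet? st.1 (i : Int) with
  | none => st                             -- unreachable: i < len(labels)
  | some v =>
    if v ≠ st.2 then
      if future_check st.1 (i : Int) n then (st.1, v)
      else (st.1.set i st.2, st.2)
    else st

def corrector (labels : List Int) (n : Int) : List Int :=
  match PySem.List.pyGet? labels 0 with
  | none => []                             -- labels[0] raises IndexError; excluded by Pre_
  | some current =>
    ((List.range labels.length).foldl (correctorStep n) (labels, current)).1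

-- ===== PORT B =====
-- the backward run-building loop of Source B, as right-to-left structural recursion
def runs : List Int → List Nat
  | [] => []
  | a :: rest =>
    (match rest, runs rest with
     | b :: _, k :: _ => if a = b then k + 1 else 1
     | _, _ => 1) :: runs rest

-- the single forward pass of Source B: current + one run-length comparison per position
def corrGo (n : Int) (cur : Int) : List (Int × Nat) → List Int
  | [] => []
  | (v, r) :: rest =>
    if v ≠ cur ∧ (r : Int) ≥ min (n + 1) ((rest.length : Int) + 1) then
      v :: corrGo n v rest
    else
      cur :: corrGo n cur rest

def corrector_alt (labels : List Int) (n : Int) : List Int :=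
  match labels with
  | [] => []
  | c :: _ => corrGo n c (labels.zip (runs labels))

-- ===== PRECONDITION & SPEC =====
-- Pre_ excludes only the empty list, on which A raises IndexError at labels[0].
def Pre_corrector (labels : List Int) (n : Int) : Prop := labels ≠ []
instance (labels : List Int) (n : Int) : Decidable (Pre_corrector labels n) := by
  unfold Pre_corrector; infer_instance

def pvWitness_corrector : List Int × Int := ([1, 2, 2, 1], 1)

-- On an empty labels list A raises IndexError (labels[0]); B returns the empty list.
def Raises_corrector (labels : List Int) (n : Int) : Prop := labels = []
instance (labels : List Int) (n : Int) : Decidable (Raises_corrector labels n) := by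
  unfold Raises_corrector; infer_instance
def pvRaiseWitness_corrector : List Int × Int := ([], 0)
def pvRaiseWitnessOut_corrector : List Int := []

def Spec_corrector (labels : List Int) (n : Int) (out : List Int) : Prop := out = corrector_alt labels n
instance (labels : List Int) (n : Int) (out : List Int) : Decidable (Spec_corrector labels n out) := by unfold Spec_corrector; infer_instance

-- ===== CLAIM (what is proved, stated in full; the proofs are below) =====
def Claim_equal_corrector : Prop := ∀ (labels : List Int) (n : Int), Dom_corrector labels n → Pre_corrector labels n → Spec_corrector labels n (corrector labels n)

def Claim_raises_corrector : Prop := (∀ (labels : List Int) (n : Int), Dom_corrector labels n → Raises_corrector labels n → ¬ Pre_corrector labels n) ∧ (Dom_corrector (pvRaiseWitness_corrector.1) (pvRaiseWitness_corrector.2) ∧ Raises_corrector (pvRaiseWitness_corrector.1) (pvRaiseWitness_corrector.2) ∧ corrector_alt (pvRaiseWitness_corrector.1) (pvRaiseWitness_corrector.2) = pvRaiseWitnessOut_corrector)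

-- ===== LEMMAS AND PROOFS =====

theorem runs_cons (a : Int) (rest : List Int) :
    runs (a :: rest) = (1 + (rest.takeWhile (fun x => x == a)).length) :: runs rest := by
  induction rest generalizing a with
  | nil => simp [runs]
  | cons b r ih =>
    rw [show runs (a :: b :: r)
        = (match b :: r, runs (b :: r) with
           | b' :: _, k :: _ => if a = b' then k + 1 else 1
           | _, _ => 1) :: runs (b :: r) from rfl]
    rw [ih b]
    by_cases hab : a = b
    · rw [hab]
      have ht : (List.takeWhile (fun x => x == b) (b :: r)).length
          = (List.takeWhile (fun x => x == b) r).length + 1 := by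
        simp [List.takeWhile]
      rw [ht]
      show (if b = b then (1 + (List.takeWhile (fun x => x == b) r).length) + 1 else 1) :: _ = _
      rw [if_pos rfl]
      congr 1
    · have hba : (b == a) = false := by simp [Ne.symm hab]
      simp [List.takeWhile, hba, hab]

theorem runs_length (l : List Int) : (runs l).length = l.length := by
  induction l with
  | nil => rfl
  | cons a r ih => simp [runs, ih]

theorem set_append_mid (pre l : List Int) (x y : Int) :
    (pre ++ x :: l).set pre.length y = pre ++ y :: l := by
  induction pre with
  | nil => simp
  | cons p ps ih => simp [ih]

theorem fc_go_eq (pre rest : List Int) (v : Int) (fuel : Nat) : ∀ (j : Nat) (res : Bool),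
    fc_go (pre ++ v :: rest) (pre.length : Int) j fuel res
      = (res && ((rest.drop j).take fuel).all (fun x => x == v)) := by
  induction fuel with
  | zero => intro j res; simp [fc_go]
  | succ f ih =>
    intro j res
    rw [fc_go]
    have hidx : ((pre.length : Int) + (j : Int) + 1) = ((pre.length + (j + 1) : Nat) : Int) := by
      push_cast; ring
    rw [hidx, PySem.List.pyGet?_natCast]
    rcases hj : rest[j]? with _ | c
    · have hget : (pre ++ v :: rest)[pre.length + (j + 1)]? = none := by
        rw [List.getElem?_append_right (by omega)]
        simpa using hj
      rw [hget]
      have hnil : rest.drop j = [] := by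
        rw [List.drop_eq_nil_iff]
        exact (by have := List.getElem?_eq_none_iff.mp hj; omega)
      simp [hnil]
    · have hget : (pre ++ v :: rest)[pre.length + (j + 1)]? = some c := by
        rw [List.getElem?_append_right (by omega)]
        simpa using hj
      rw [hget]
      change fc_go (pre ++ v :: rest) (pre.length : Int) (j + 1) f
          (if PySem.List.pyGet? (pre ++ v :: rest) (pre.length : Int) ≠ some c then false else res) = _
      rw [PySem.List.pyGet?_append_length, ih]
      obtain ⟨hlt, hce⟩ := List.getElem?_eq_some_iff.mp hj
      have hdrop : rest.drop j = c :: rest.drop (j + 1) := by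
        rw [List.drop_eq_getElem_cons hlt, hce]
      rw [hdrop]
      by_cases hvc : v = c
      · simp [hvc]
      · have : (c == v) = false := by simp [Ne.symm hvc]
        simp [hvc, this]

theorem future_check_eq (pre rest : List Int) (v : Int) (n : Int) :
    future_check (pre ++ v :: rest) (pre.length : Int) n
      = (rest.take n.toNat).all (fun x => x == v) := by
  rw [future_check, fc_go_eq]
  simp

theorem nat_cond (v : Int) (rest : List Int) (k : Nat) :
    ((rest.take k).all (fun x => x == v) = true)
      ↔ (rest.takeWhile (fun x => x == v)).length ≥ min k rest.length := by
  induction rest generalizing k with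
  | nil => simp
  | cons b r ih =>
    cases k with
    | zero => simp
    | succ k =>
      by_cases hb : b = v
      · have hbv : (b == v) = true := by simp [hb]
        simp only [List.take, List.all_cons, List.takeWhile, hbv, Bool.and_eq_true, ih k]
        simp
      · have hbv : (b == v) = false := by simp [hb]
        simp [List.takeWhile, hbv]

theorem cond_iff (v : Int) (rest : List Int) (n : Int) :
    ((rest.take n.toNat).all (fun x => x == v) = true)
      ↔ ((1 + (rest.takeWhile (fun x => x == v)).length : Int) ≥ min (n + 1) ((rest.length : Int) + 1)) := by
  by_cases hn : n ≤ -1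
  · have h0 : n.toNat = 0 := by omega
    simp [h0]
    omega
  · have hk : (n.toNat : Int) = n := by omega
    rw [nat_cond]
    omega

theorem main_lemma (n : Int) (t : List Int) : ∀ (pre : List Int) (cur : Int),
    ((List.range' pre.length t.length).foldl (correctorStep n) (pre ++ t, cur)).1
      = pre ++ corrGo n cur (t.zip (runs t)) := by
  induction t with
  | nil => intro pre cur; simp [corrGo]
  | cons v rest ih =>
    intro pre cur
    rw [List.length_cons, List.range'_succ, List.foldl_cons]
    have hstep : correctorStep n (pre ++ v :: rest, cur) pre.length
        = (if v ≠ cur then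
             (if (rest.take n.toNat).all (fun x => x == v) then (pre ++ v :: rest, v)
              else (pre ++ cur :: rest, cur))
           else (pre ++ v :: rest, cur)) := by
      rw [correctorStep]
      simp only [PySem.List.pyGet?_append_length, future_check_eq, set_append_mid]
    rw [hstep]
    have hzip : (v :: rest).zip (runs (v :: rest))
        = (v, 1 + (rest.takeWhile (fun x => x == v)).length) :: rest.zip (runs rest) := by
      rw [runs_cons]; rfl
    rw [hzip]
    have hlen : (rest.zip (runs rest)).length = rest.length := by
      simp [runs_length]
    by_cases hv : v = cur
    · rw [if_neg (by simp [hv])]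
      have h1 : pre ++ v :: rest = (pre ++ [v]) ++ rest := by simp
      have h2 : pre.length + 1 = (pre ++ [v]).length := by simp
      rw [h1, h2, ih (pre ++ [v]) cur]
      rw [corrGo, if_neg (by simp [hv])]
      simp [hv]
    · rw [if_pos hv]
      by_cases hc : (rest.take n.toNat).all (fun x => x == v) = true
      · rw [if_pos hc]
        have h1 : pre ++ v :: rest = (pre ++ [v]) ++ rest := by simp
        have h2 : pre.length + 1 = (pre ++ [v]).length := by simp
        rw [h1, h2, ih (pre ++ [v]) v]
        rw [corrGo, if_pos (by
          refine ⟨hv, ?_⟩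
          rw [hlen]
          exact_mod_cast (cond_iff v rest n).mp hc)]
        simp
      · rw [if_neg (by simpa using hc)]
        have h1 : pre ++ cur :: rest = (pre ++ [cur]) ++ rest := by simp
        have h2 : pre.length + 1 = (pre ++ [cur]).length := by simp
        rw [h1, h2, ih (pre ++ [cur]) cur]
        rw [corrGo, if_neg (by
          rintro ⟨-, hge⟩
          rw [hlen] at hge
          exact hc ((cond_iff v rest n).mpr (by exact_mod_cast hge)))]
        simp

-- ===== VERDICT (by name: the statement is the Claim_ definition above) =====
theorem corrector_spec : Claim_equal_corrector := by
  intro labels n _ hpre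
  unfold Spec_corrector
  match labels, hpre with
  | c :: t, _ =>
    rw [corrector]
    simp only [PySem.List.pyGet?_zero_cons]
    rw [List.range_eq_range']
    have := main_lemma n (c :: t) [] c
    simpa [corrector_alt] using this

@[simp] theorem corrector_raises : Claim_raises_corrector := by
  unfold Claim_raises_corrector
  exact ⟨fun labels n _ h hp => hp h, by decide⟩
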